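-- pv_equiv track=rewrite | github.com/mmedlock1970/UITraps_Platform | backend/src/site_analyzer.py | _build_task_description
-- ===== SOURCE A (Python) =====
-- from typing import Dict, List, Any, Optional
--
-- def _build_task_description(relevant_tasks: Dict[str, List[str]], page_role: str) -> str:
--     """Build a task description that respects page role."""
--     lines = []
--
--     if relevant_tasks.get("full"):
--         lines.append("PRIMARY tasks for this page type:")
--         for task in relevant_tasks["full"]:
--             lines.append(f"  - {task}")
--
--     if relevant_tasks.get("partial"):
--         lines.append("\nSECONDARY tasks (evaluate pathway, not full completion):")
--         for task in relevant_tasks["partial"]: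
--             lines.append(f"  - {task}")
--
--     if relevant_tasks.get("navigation_only"):
--         lines.append("\nNAVIGATION-ONLY (just check if link/path exists):")
--         for task in relevant_tasks["navigation_only"]:
--             lines.append(f"  - {task}")
--
--     if not lines:
--         lines.append(f"General evaluation of {page_role} page usability")
--
--     return "\n".join(lines)
-- ===== SOURCE B (Python) =====
-- _SECTIONS = [
--     ("full", "PRIMARY tasks for this page type:"),
--     ("partial", "\nSECONDARY tasks (evaluate pathway, not full completion):"),
--     ("navigation_only", "\nNAVIGATION-ONLY (just check if link/path exists):"),
-- ]
--
-- def _build_task_description(relevant_tasks, page_role):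
--     """Build a task description that respects page role (recursive string builder)."""
--     def go(i):
--         # build the remaining text back-to-front, no intermediate line list
--         if i == len(_SECTIONS):
--             return ""
--         key, header = _SECTIONS[i]
--         rest = go(i + 1)
--         tasks = relevant_tasks.get(key)
--         if not tasks:
--             return rest
--         body = header + "".join("\n  - " + t for t in tasks)
--         return body + "\n" + rest if rest else body
--     return go(0) or f"General evaluation of {page_role} page usability"
-- ===== Notes on version B (the rewrite author's own statement) =====
-- stated objective: alternative
-- what changed: Instead of accumulating a flat list of lines and joining at the end, B recurses over the section table back-to-front, builds each section as one whole string (header concatenated with its indented tasks) and concatenates it onto the already-built rest with an explicit separator, so no intermediate line list and no final join exist.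
import Mathlib
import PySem

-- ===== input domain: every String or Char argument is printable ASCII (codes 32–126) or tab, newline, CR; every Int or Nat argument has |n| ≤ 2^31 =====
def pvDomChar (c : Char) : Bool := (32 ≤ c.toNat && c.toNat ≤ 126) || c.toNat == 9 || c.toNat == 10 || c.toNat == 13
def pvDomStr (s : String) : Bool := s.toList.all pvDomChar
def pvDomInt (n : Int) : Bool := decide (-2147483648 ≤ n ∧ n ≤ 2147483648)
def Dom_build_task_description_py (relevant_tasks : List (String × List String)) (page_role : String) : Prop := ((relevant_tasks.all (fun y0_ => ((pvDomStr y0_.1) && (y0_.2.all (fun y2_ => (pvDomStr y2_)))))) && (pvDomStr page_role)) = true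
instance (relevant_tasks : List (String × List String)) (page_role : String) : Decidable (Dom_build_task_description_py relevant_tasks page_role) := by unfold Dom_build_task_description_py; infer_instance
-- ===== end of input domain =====

-- B builds the result back-to-front by a recursion over the section table, concatenating
-- whole section strings directly, with no intermediate line list and no final join; objective: alternative.

-- ===== PORT A =====
-- relevant_tasks.get(key): first-match lookup on the association list (Python dict)
def pvGetA (d : List (String × List String)) (k : String) : Option (List String) :=
  match d with
  | [] => none
  | (k', v) :: rest => if k' == k then some v else pvGetA rest k

def build_task_description_py (relevant_tasks : List (String × List String)) (page_role : String) : String :=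
  let lines : List String := []
  -- if relevant_tasks.get("full"): append header, then each "  - task"
  let lines := match pvGetA relevant_tasks "full" with
    | some l => if l.isEmpty then lines else
        (lines ++ ["PRIMARY tasks for this page type:"]) ++ l.map (fun task => "  - " ++ task)
    | none => lines
  let lines := match pvGetA relevant_tasks "partial" with
    | some l => if l.isEmpty then lines else
        (lines ++ ["\nSECONDARY tasks (evaluate pathway, not full completion):"]) ++ l.map (fun task => "  - " ++ task)
    | none => lines
  let lines := match pvGetA relevant_tasks "navigation_only" with
    | some l => if l.isEmpty then lines else
        (lines ++ ["\nNAVIGATION-ONLY (just check if link/path exists):"]) ++ l.map (fun task => "  - " ++ task)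
    | none => lines
  let lines := if lines.isEmpty then ["General evaluation of " ++ page_role ++ " page usability"] else lines
  PySem.Str.join "\n" lines

-- ===== PORT B =====
def pvGetB (d : List (String × List String)) (k : String) : Option (List String) :=
  match d with
  | [] => none
  | (k', v) :: rest => if k' == k then some v else pvGetB rest k

def pvSections : List (String × String) :=
  [("full", "PRIMARY tasks for this page type:"),
   ("partial", "\nSECONDARY tasks (evaluate pathway, not full completion):"),
   ("navigation_only", "\nNAVIGATION-ONLY (just check if link/path exists):")]

-- the inner recursive go(i): build the remaining text back-to-front; 'if not tasks' and
-- 'if rest' are Python truthiness (empty/missing list, empty string)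
def pvGo (relevant_tasks : List (String × List String)) : List (String × String) → String
  | [] => ""
  | (key, header) :: secs =>
      let rest := pvGo relevant_tasks secs
      match pvGetB relevant_tasks key with
      | none => rest
      | some tasks =>
          if tasks.isEmpty then rest
          else
            let body := header ++ PySem.Str.join "" (tasks.map (fun t => "\n  - " ++ t))
            if rest == "" then body else body ++ "\n" ++ rest

def build_task_description_py_alt (relevant_tasks : List (String × List String)) (page_role : String) : String :=
  if pvGo relevant_tasks pvSections == "" then
    "General evaluation of " ++ page_role ++ " page usability"
  else pvGo relevant_tasks pvSections

-- ===== PRECONDITION & SPEC =====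
def Spec_build_task_description_py (relevant_tasks : List (String × List String)) (page_role : String) (out : String) : Prop := out = build_task_description_py_alt relevant_tasks page_role
instance (relevant_tasks : List (String × List String)) (page_role : String) (out : String) : Decidable (Spec_build_task_description_py relevant_tasks page_role out) := by unfold Spec_build_task_description_py; infer_instance

-- ===== CLAIM (what is proved, stated in full; the proofs are below) =====
def Claim_equal_build_task_description_py : Prop := ∀ (relevant_tasks : List (String × List String)) (page_role : String), Dom_build_task_description_py relevant_tasks page_role → Spec_build_task_description_py relevant_tasks page_role (build_task_description_py relevant_tasks page_role)

-- ===== LEMMAS AND PROOFS =====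

theorem pvGetB_eq_pvGetA (d : List (String × List String)) (k : String) : pvGetB d k = pvGetA d k := by
  induction d with
  | nil => rfl
  | cons hd tl ih => simp [pvGetA, pvGetB, ih]

-- the block of lines a section contributes in A
def pvBlk (rt : List (String × List String)) (k h : String) : List String :=
  match pvGetA rt k with
  | none => []
  | some l => if l.isEmpty then [] else h :: l.map (fun task => "  - " ++ task)

def pvLinesOf (rt : List (String × List String)) : List (String × String) → List String
  | [] => []
  | (k, h) :: secs => pvBlk rt k h ++ pvLinesOf rt secs

-- basic join equations
theorem join_nil_str (sep : String) : PySem.Str.join sep [] = "" := by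
  simp [PySem.Str.join, PySem.Chars.join, List.intercalate]

theorem join_singleton_str (sep s : String) : PySem.Str.join sep [s] = s := by
  simp [PySem.Str.join, PySem.Chars.join, List.intercalate]

theorem join_cons_cons_str (sep a b : String) (r : List String) :
    PySem.Str.join sep (a :: b :: r) = a ++ sep ++ PySem.Str.join sep (b :: r) := by
  simp [PySem.Str.join, PySem.Chars.join, List.intercalate, String.ext_iff]

theorem join_cons_of_ne (sep a : String) (r : List String) (hr : r ≠ []) :
    PySem.Str.join sep (a :: r) = a ++ sep ++ PySem.Str.join sep r := by
  cases r with
  | nil => exact absurd rfl hr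
  | cons b t => exact join_cons_cons_str sep a b t

-- the section body B builds equals the join of A's block for that section
theorem body_eq_join (h : String) (l : List String) (hl : l ≠ []) :
    h ++ PySem.Str.join "" (l.map (fun t => "\n  - " ++ t)) =
      PySem.Str.join "\n" (h :: l.map (fun task => "  - " ++ task)) := by
  induction l generalizing h with
  | nil => exact absurd rfl hl
  | cons x xs ih =>
      cases xs with
      | nil =>
          rw [List.map_cons, List.map_nil, List.map_cons, List.map_nil,
            join_singleton_str, join_cons_cons_str, join_singleton_str]
          simp [String.ext_iff]
      | cons y ys =>
          have hx := ih ("  - " ++ x) (by simp)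
          simp only [List.map_cons] at hx ⊢
          rw [join_cons_cons_str "", join_cons_cons_str "\n" h, ← hx]
          simp [String.ext_iff]

-- splicing: join over a nonempty block followed by more lines
theorem join_splice (h : String) (m ys : List String) :
    PySem.Str.join "\n" ((h :: m) ++ ys) =
      PySem.Str.join "\n" (h :: m) ++ (if ys.isEmpty then "" else "\n" ++ PySem.Str.join "\n" ys) := by
  induction m generalizing h with
  | nil =>
      cases ys with
      | nil => simp [join_singleton_str]
      | cons y r =>
          rw [List.singleton_append, join_cons_of_ne "\n" h (y :: r) (by simp),
            join_singleton_str]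
          simp [String.ext_iff]
  | cons a m ih =>
      rw [List.cons_append, List.cons_append, join_cons_cons_str]
      have := ih a
      rw [List.cons_append] at this
      rw [this, join_cons_cons_str]
      split <;> simp [String.ext_iff]

theorem toList_join_ne_nil (h : String) (m : List String) (hh : h.toList ≠ []) :
    (PySem.Str.join "\n" (h :: m)).toList ≠ [] := by
  cases m with
  | nil => simpa [join_singleton_str] using hh
  | cons b r =>
      rw [join_cons_cons_str]
      simp only [String.toList_append]
      intro hcontr
      rw [List.append_eq_nil_iff, List.append_eq_nil_iff] at hcontr
      exact hh hcontr.1.1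

theorem str_eq_empty_iff (s : String) : (s == "") = s.toList.isEmpty := by
  by_cases h : s = ""
  · subst h; simp
  · have h2 : s.toList ≠ [] := by
      intro hc
      exact h (String.ext_iff.mpr (by simpa using hc))
    cases hb : s == "" with
    | true => exact absurd (eq_of_beq hb) h
    | false =>
        cases hl : s.toList with
        | nil => exact absurd hl h2
        | cons a t => simp

-- every header in pvSections is a nonempty string
def pvHdrsOk : List (String × String) → Prop
  | [] => True
  | (_, h) :: secs => h.toList ≠ [] ∧ pvHdrsOk secs

theorem pvGo_eq_join (rt : List (String × List String)) (secs : List (String × String))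
    (hok : pvHdrsOk secs) :
    pvGo rt secs = PySem.Str.join "\n" (pvLinesOf rt secs) ∧
      ((pvGo rt secs == "") = (pvLinesOf rt secs).isEmpty) := by
  induction secs with
  | nil => simp [pvGo, pvLinesOf, join_nil_str]
  | cons kh secs ih =>
      obtain ⟨k, h⟩ := kh
      obtain ⟨hh, hok2⟩ := hok
      obtain ⟨ihe, ihz⟩ := ih hok2
      simp only [pvGo, pvLinesOf, pvBlk, pvGetB_eq_pvGetA]
      cases pvGetA rt k with
      | none => exact ⟨ihe, ihz⟩
      | some l =>
          by_cases hl : l.isEmpty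
          · simp only [hl, if_true, List.nil_append]
            exact ⟨ihe, ihz⟩
          · simp only [hl, Bool.false_eq_true, if_false, List.cons_append]
            rw [body_eq_join h l (by cases l <;> simp_all), ← List.cons_append, join_splice, ihz]
            have hbody := toList_join_ne_nil h (l.map (fun task => "  - " ++ task)) hh
            constructor
            · split
              · simp
              · rw [ihe]
                simp [String.ext_iff]
            · rw [str_eq_empty_iff]
              split <;> simp_all [String.toList_append]

-- A's result in terms of the blocks
theorem A_eq (rt : List (String × List String)) (pr : String) :
    build_task_description_py rt pr =
      PySem.Str.join "\n" (if (pvLinesOf rt pvSections).isEmpty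
        then ["General evaluation of " ++ pr ++ " page usability"]
        else pvLinesOf rt pvSections) := by
  unfold build_task_description_py
  simp only [pvLinesOf, pvSections, pvBlk, List.append_nil, List.nil_append]
  cases pvGetA rt "full" <;> cases pvGetA rt "partial" <;> cases pvGetA rt "navigation_only" <;>
    simp_all <;> split_ifs <;> simp_all [List.append_assoc]

-- ===== VERDICT (by name: the statement is the Claim_ definition above) =====
theorem build_task_description_py_spec : Claim_equal_build_task_description_py := by
  intro rt pr _
  unfold Spec_build_task_description_py
  simp only [build_task_description_py_alt]
  have hok : pvHdrsOk pvSections := ⟨by decide, by decide, by decide, trivial⟩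
  obtain ⟨he, hz⟩ := pvGo_eq_join rt pvSections hok
  rw [A_eq, hz, he]
  split
  · rw [join_singleton_str]
  · rfl
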